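-- pv_equiv track=rewrite | github.com/1200park/Algorithm | 프로그래머스/0/181890. 왼쪽 오른쪽/왼쪽 오른쪽.py | solution
-- ===== SOURCE A (Python) =====
-- def solution(str_list):
--     answer = []
--
--     for x, y in enumerate(str_list):
--         if y == "l":
--             return str_list[:x]
--
--         if y == "r":
--             return str_list[x+1:]
--
--     return []
-- ===== SOURCE B (Python) =====
-- def solution(str_list):
--     try:
--         li = str_list.index("l")
--     except ValueError:
--         li = None
--     try:
--         ri = str_list.index("r")
--     except ValueError:
--         ri = None
--     if li is None and ri is None:
--         return []
--     if ri is None or (li is not None and li < ri):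
--         return str_list[:li]
--     return str_list[ri + 1:]
-- ===== Notes on version B (the rewrite author's own statement) =====
-- stated objective: idiomatic
-- what changed: Replaced the single enumerate loop with early returns by finding the first indices of 'l' and 'r' separately with list.index and comparing them to pick the slice.
import Mathlib
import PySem

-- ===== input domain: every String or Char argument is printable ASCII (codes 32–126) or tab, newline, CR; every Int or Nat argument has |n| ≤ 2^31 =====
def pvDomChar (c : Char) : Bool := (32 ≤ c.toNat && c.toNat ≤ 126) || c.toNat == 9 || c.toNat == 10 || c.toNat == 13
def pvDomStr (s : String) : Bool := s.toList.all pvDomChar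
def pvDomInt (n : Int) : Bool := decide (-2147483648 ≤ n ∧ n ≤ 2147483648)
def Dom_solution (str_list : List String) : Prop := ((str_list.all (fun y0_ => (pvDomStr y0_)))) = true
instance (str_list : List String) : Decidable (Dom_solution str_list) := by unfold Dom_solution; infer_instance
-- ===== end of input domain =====

-- B finds the first indices of "l" and "r" separately and compares them, instead of A's single indexed scan with early returns.


-- ===== PORT A =====
-- enumerate loop: scan with running index x over the remaining suffix of the original list
def solutionGo (orig : List String) : List String → Nat → List String
  | [], _ => []
  | y :: rest, x =>
    if y = "l" then orig.take x
    else if y = "r" then orig.drop (x + 1)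
    else solutionGo orig rest (x + 1)

def solution (str_list : List String) : List String := solutionGo str_list str_list 0

-- ===== PORT B =====
-- li / ri: first index of "l" / "r" (none if absent), then compare
def solution_alt (str_list : List String) : List String :=
  let li := PySem.List.index? str_list "l"
  let ri := PySem.List.index? str_list "r"
  if li.isNone ∧ ri.isNone then []
  else if ri.isNone ∨ (li.isSome ∧ li.getD 0 < ri.getD 0) then str_list.take (li.getD 0)
  else str_list.drop (ri.getD 0 + 1)

-- ===== PRECONDITION & SPEC =====
def Spec_solution (str_list : List String) (out : List String) : Prop := out = solution_alt str_list
instance (str_list : List String) (out : List String) : Decidable (Spec_solution str_list out) := by unfold Spec_solution; infer_instance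

-- ===== CLAIM (what is proved, stated in full; the proofs are below) =====
def Claim_equal_solution : Prop := ∀ (str_list : List String), Dom_solution str_list → Spec_solution str_list (solution str_list)

-- ===== LEMMAS AND PROOFS =====

lemma go_eq (orig : List String) : ∀ (rest : List String) (x : Nat),
    solutionGo orig rest x =
      match PySem.List.index? rest "l", PySem.List.index? rest "r" with
      | none, none => []
      | some li, none => orig.take (x + li)
      | none, some ri => orig.drop (x + ri + 1)
      | some li, some ri => if li < ri then orig.take (x + li) else orig.drop (x + ri + 1)
  | [], x => by simp [solutionGo, PySem.List.index?]
  | y :: rest, x => by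
    by_cases hl : y = "l"
    · subst hl
      rw [PySem.List.index?_cons_self,
          PySem.List.index?_cons_of_ne (xs := rest) (show ("l" : String) ≠ "r" by decide)]
      cases h : PySem.List.index? rest "r" with
      | none => simp [solutionGo]
      | some ri => simp [solutionGo]
    · by_cases hr : y = "r"
      · subst hr
        rw [PySem.List.index?_cons_self,
            PySem.List.index?_cons_of_ne (xs := rest) (show ("r" : String) ≠ "l" by decide)]
        cases h : PySem.List.index? rest "l" with
        | none => simp [solutionGo, hl]
        | some li => simp [solutionGo, hl]
      · rw [show solutionGo orig (y :: rest) x = solutionGo orig rest (x + 1) by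
          simp [solutionGo, hl, hr]]
        rw [go_eq orig rest (x + 1),
            PySem.List.index?_cons_of_ne (xs := rest) hl,
            PySem.List.index?_cons_of_ne (xs := rest) hr]
        cases h1 : PySem.List.index? rest "l" with
        | none =>
          cases h2 : PySem.List.index? rest "r" with
          | none => simp
          | some ri => simp [show x + 1 + ri + 1 = x + (ri + 1) + 1 by omega]
        | some li =>
          cases h2 : PySem.List.index? rest "r" with
          | none => simp [show x + 1 + li = x + (li + 1) by omega]
          | some ri =>
            simp only [Option.map_some]
            have hiff : li < ri ↔ li + 1 < ri + 1 := by omega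
            by_cases hlt : li < ri
            · simp [hlt, hiff.mp hlt, show x + 1 + li = x + (li + 1) by omega]
            · simp [hlt, show x + 1 + ri + 1 = x + (ri + 1) + 1 by omega]

-- ===== VERDICT (by name: the statement is the Claim_ definition above) =====
theorem solution_spec : Claim_equal_solution := by
  intro str_list _
  unfold Spec_solution solution solution_alt
  rw [go_eq]
  cases h1 : PySem.List.index? str_list "l" with
  | none =>
    cases h2 : PySem.List.index? str_list "r" with
    | none => simp
    | some ri => simp
  | some li =>
    cases h2 : PySem.List.index? str_list "r" with
    | none => simp
    | some ri => by_cases hlt : li < ri <;> simp [hlt]
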